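-- pv_equiv track=rewrite | github.com/aluferraz/leetcode-python | leetcode/editor/en/Q1183/MaximumNumberOfOnes.py | maximumNumberOfOnes
-- ===== SOURCE A (Python) =====
-- import heapq
--
-- def maximumNumberOfOnes(width, height, sideLength, maxOnes):
--     """
--     :type width: int
--     :type height: int
--     :type sideLength: int
--     :type maxOnes: int
--     :rtype: int
--     """
--     if maxOnes == 0:
--         return 0
--     matrix = [
--         [0 for _ in range(sideLength)] for _ in range(sideLength)
--     ]
--
--     squares = {}
--
--     def isValidIdx(row, col):
--         return row >= 0 and row < height and col >= 0 and col < height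
--
--     for i in range(height):
--         for j in range(width):
--             matrix[i % sideLength][j % sideLength] += 1
--
--     most_frequent = []
--     for i in range(sideLength):
--         for j in range(sideLength):
--             heapq.heappush(most_frequent, ((-matrix[i][j], (i, j))))
--
--     total = 0
--     for i in range(maxOnes):
--         total += abs(heapq.heappop(most_frequent)[0])
--     return total
-- ===== SOURCE B (Python) =====
-- def maximumNumberOfOnes(width, height, sideLength, maxOnes):
--     if maxOnes <= 0:
--         return 0
--     s = sideLength
--     h = max(height, 0)
--     w = max(width, 0)
--     hq, hr = h // s, h % s
--     wq, wr = w // s, w % s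
--     # cell (i, j) of the s x s pattern is covered (hq+1 or hq) * (wq+1 or wq) times;
--     # bucket the four possible values with their multiplicities and take the best maxOnes
--     buckets = [((hq + 1) * (wq + 1), hr * wr),
--                ((hq + 1) * wq, hr * (s - wr)),
--                (hq * (wq + 1), (s - hr) * wr),
--                (hq * wq, (s - hr) * (s - wr))]
--     buckets.sort(key=lambda b: b[0], reverse=True)
--     total = 0
--     remaining = maxOnes
--     for v, cnt in buckets:
--         take = min(cnt, remaining)
--         total += take * v
--         remaining -= take
--     return total
-- ===== Notes on version B (the rewrite author's own statement) =====
-- stated objective: faster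
-- what changed: Instead of incrementing a sideLength x sideLength matrix once per grid cell (O(width*height)) and popping a heap maxOnes times, B derives each residue count by integer division, buckets the at most four distinct per-cell cover counts with their multiplicities and greedily takes the top maxOnes in O(1).
import Mathlib
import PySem

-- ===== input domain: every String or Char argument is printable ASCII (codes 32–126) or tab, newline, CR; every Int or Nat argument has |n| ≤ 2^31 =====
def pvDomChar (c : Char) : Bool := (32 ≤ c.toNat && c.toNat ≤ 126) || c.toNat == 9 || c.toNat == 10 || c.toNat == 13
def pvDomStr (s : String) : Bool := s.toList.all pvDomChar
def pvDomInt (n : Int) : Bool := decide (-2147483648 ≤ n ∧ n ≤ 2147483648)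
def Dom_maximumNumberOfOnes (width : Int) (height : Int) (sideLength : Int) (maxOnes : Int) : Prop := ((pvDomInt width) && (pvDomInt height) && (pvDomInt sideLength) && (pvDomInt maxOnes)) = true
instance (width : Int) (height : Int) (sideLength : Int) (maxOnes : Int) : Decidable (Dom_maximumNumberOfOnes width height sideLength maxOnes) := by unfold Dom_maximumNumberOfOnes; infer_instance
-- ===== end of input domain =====

-- B replaces A's O(width*height) per-cell increment loop and heap by closed-form residue
-- counts (integer division), four value buckets and a greedy take of the top maxOnes.

-- ===== PORT A =====
-- heapq is modelled by its contract: the heap is its content list, heappush appends,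
-- heappop removes the lexicographically least tuple (exact: Python's heappop returns the
-- minimum under tuple comparison, and all pushed tuples are distinct).
def pvLexLt (x y : Int × Int × Int) : Bool :=
  decide (x.1 < y.1 ∨ (x.1 = y.1 ∧ (x.2.1 < y.2.1 ∨ (x.2.1 = y.2.1 ∧ x.2.2 < y.2.2))))

def pvHeapPop (l : List (Int × Int × Int)) : Option ((Int × Int × Int) × List (Int × Int × Int)) :=
  match l with
  | [] => none
  | x :: xs =>
    let mn := xs.foldl (fun a b => if pvLexLt b a then b else a) x
    some (mn, (x :: xs).erase mn)

def maximumNumberOfOnes (width : Int) (height : Int) (sideLength : Int) (maxOnes : Int) : Int :=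
  if maxOnes = 0 then 0
  else
    -- matrix[i % sideLength][j % sideLength] += 1 over the whole grid (zero-initialised matrix
    -- as a dict with default 0; inside Pre_ the residues hit exactly the matrix's index range)
    let matrix : PySem.Dict (Int × Int) Int :=
      (PySem.List.pyRange 0 height 1).foldl (fun d i =>
        (PySem.List.pyRange 0 width 1).foldl (fun d j =>
          d.modify (PySem.Int.mod i sideLength, PySem.Int.mod j sideLength) 0 (· + 1)) d)
        PySem.Dict.empty
    -- heappush(most_frequent, (-matrix[i][j], (i, j)))
    let heap : List (Int × Int × Int) :=
      (PySem.List.pyRange 0 sideLength 1).foldl (fun acc i =>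
        (PySem.List.pyRange 0 sideLength 1).foldl (fun acc j =>
          acc ++ [(-(matrix.getD (i, j) 0), i, j)]) acc) []
    -- total += abs(heappop(most_frequent)[0]), maxOnes times (pop of an empty heap is a
    -- Python IndexError, excluded by Pre_; the port keeps the state unchanged there)
    let res := (PySem.List.pyRange 0 maxOnes 1).foldl
      (fun (st : Int × List (Int × Int × Int)) _ =>
        match pvHeapPop st.2 with
        | none => st
        | some (x, rest) => (st.1 + |x.1|, rest)) (0, heap)
    res.1

-- ===== PORT B =====
def maximumNumberOfOnes_alt (width : Int) (height : Int) (sideLength : Int) (maxOnes : Int) : Int :=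
  if maxOnes ≤ 0 then 0
  else
    let s := sideLength
    let h := max height 0
    let w := max width 0
    let hq := PySem.Int.floordiv h s
    let hr := PySem.Int.mod h s
    let wq := PySem.Int.floordiv w s
    let wr := PySem.Int.mod w s
    let buckets := PySem.List.sorted
      [((hq + 1) * (wq + 1), hr * wr),
       ((hq + 1) * wq, hr * (s - wr)),
       (hq * (wq + 1), (s - hr) * wr),
       (hq * wq, (s - hr) * (s - wr))] (fun b => b.1) true
    let res := buckets.foldl (fun (st : Int × Int) p =>
      (st.1 + min p.2 st.2 * p.1, st.2 - min p.2 st.2)) (0, maxOnes)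
    res.1

-- ===== PRECONDITION & SPEC =====
-- Pre_ is exact: A raises (ZeroDivisionError indexing matrix[i % 0] / IndexError popping an
-- empty or exhausted heap) precisely on the inputs excluded here; everywhere else it returns.
def Pre_maximumNumberOfOnes (width : Int) (height : Int) (sideLength : Int) (maxOnes : Int) : Prop :=
  maxOnes = 0 ∨
  (maxOnes < 0 ∧ (1 ≤ sideLength ∨ height ≤ 0 ∨ width ≤ 0)) ∨
  (0 < maxOnes ∧ 1 ≤ sideLength ∧ maxOnes ≤ sideLength * sideLength)
instance (width : Int) (height : Int) (sideLength : Int) (maxOnes : Int) : Decidable (Pre_maximumNumberOfOnes width height sideLength maxOnes) := by unfold Pre_maximumNumberOfOnes; infer_instance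

def pvWitness_maximumNumberOfOnes : Int × Int × Int × Int := (3, 4, 2, 3)

def Spec_maximumNumberOfOnes (width : Int) (height : Int) (sideLength : Int) (maxOnes : Int) (out : Int) : Prop := out = maximumNumberOfOnes_alt width height sideLength maxOnes
instance (width : Int) (height : Int) (sideLength : Int) (maxOnes : Int) (out : Int) : Decidable (Spec_maximumNumberOfOnes width height sideLength maxOnes out) := by unfold Spec_maximumNumberOfOnes; infer_instance

-- ===== CLAIM (what is proved, stated in full; the proofs are below) =====
def Claim_equal_maximumNumberOfOnes : Prop := ∀ (width : Int) (height : Int) (sideLength : Int) (maxOnes : Int), Dom_maximumNumberOfOnes width height sideLength maxOnes → Pre_maximumNumberOfOnes width height sideLength maxOnes → Spec_maximumNumberOfOnes width height sideLength maxOnes (maximumNumberOfOnes width height sideLength maxOnes)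

-- ===== LEMMAS AND PROOFS =====

-- fold-min is a member
theorem pvFoldMin_mem (x : Int × Int × Int) (xs : List (Int × Int × Int)) :
    xs.foldl (fun a b => if pvLexLt b a then b else a) x ∈ x :: xs := by
  induction xs generalizing x with
  | nil => simp [List.foldl]
  | cons a xs ih =>
    simp only [List.foldl]
    rcases List.mem_cons.mp (ih (if pvLexLt a x then a else x)) with h | h
    · rw [h]; split <;> simp
    · simp [h]

-- fold-min's first component is least
theorem pvFoldMin_fst_le (x : Int × Int × Int) (xs : List (Int × Int × Int)) :
    ∀ y ∈ x :: xs, (xs.foldl (fun a b => if pvLexLt b a then b else a) x).1 ≤ y.1 := by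
  induction xs generalizing x with
  | nil => intro y hy; simp at hy; simp [hy, List.foldl]
  | cons a xs ih =>
    intro y hy
    simp only [List.foldl]
    have hseed : (if pvLexLt a x then a else x).1 ≤ x.1 ∧ (if pvLexLt a x then a else x).1 ≤ a.1 := by
      unfold pvLexLt
      split_ifs with hlt <;> simp at hlt <;> omega
    have hfz := ih (if pvLexLt a x then a else x)
    rcases List.mem_cons.mp hy with hy | hy
    · rw [hy] at *
      exact le_trans (hfz _ (List.mem_cons_self ..)) hseed.1
    · rcases List.mem_cons.mp hy with hy | hy
      · rw [hy] at *
        exact le_trans (hfz _ (List.mem_cons_self ..)) hseed.2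
      · exact hfz _ (List.mem_cons_of_mem _ hy)

-- ascending sort of a list with a maximal element v pulls v to the end
theorem pv_sorted_max_append (V : List Int) (v : Int) (hv : v ∈ V) (hmax : ∀ y ∈ V, y ≤ v) :
    PySem.List.sorted V (fun x => x) false
      = PySem.List.sorted (V.erase v) (fun x => x) false ++ [v] := by
  apply PySem.List.sorted_id_eq_of_perm_of_pairwise
  · have h1 : (PySem.List.sorted (V.erase v) (fun x => x) false).Perm (V.erase v) :=
      PySem.List.sorted_perm _ _ _
    have h2 : ((V.erase v) ++ [v]).Perm V :=
      (List.perm_append_comm).trans (List.perm_cons_erase hv).symm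
    exact (h1.append_right _).trans h2
  · rw [List.pairwise_append]
    refine ⟨PySem.List.sorted_pairwise _ _, by simp, ?_⟩
    intro a ha b hb
    simp at hb; subst hb
    exact hmax a (List.mem_of_mem_erase ((PySem.List.mem_sorted ..).mp ha))

-- the pop loop: after n pops the total is the sum of the n largest values
theorem pv_popLoop (l : List Int) (heap : List (Int × Int × Int)) (acc : Int)
    (hlen : l.length ≤ heap.length) (hneg : ∀ x ∈ heap, x.1 ≤ 0) :
    (l.foldl (fun (st : Int × List (Int × Int × Int)) _ =>
        match pvHeapPop st.2 with
        | none => st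
        | some (x, rest) => (st.1 + |x.1|, rest)) (acc, heap)).1
    = acc + ((PySem.List.sorted (heap.map (fun x => -x.1)) (fun x => x) false).drop
        (heap.length - l.length)).sum := by
  induction l generalizing heap acc with
  | nil =>
    simp only [List.foldl, List.length_nil, Nat.sub_zero]
    rw [List.drop_eq_nil_of_le (by rw [PySem.List.length_sorted, List.length_map])]
    simp
  | cons e l ih =>
    match heap, hlen with
    | x :: xs, hlen =>
      set mn := xs.foldl (fun a b => if pvLexLt b a then b else a) x with hmn
      have hmem : mn ∈ x :: xs := pvFoldMin_mem x xs
      have hle : ∀ y ∈ x :: xs, mn.1 ≤ y.1 := pvFoldMin_fst_le x xs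
      have herlen : ((x :: xs).erase mn).length = xs.length := by
        rw [List.length_erase_of_mem hmem]; simp
      have hlen' : l.length ≤ ((x :: xs).erase mn).length := by
        rw [herlen]; simpa using hlen
      have hneg' : ∀ y ∈ (x :: xs).erase mn, y.1 ≤ 0 :=
        fun y hy => hneg y (List.mem_of_mem_erase hy)
      rw [List.foldl_cons]
      show (List.foldl (fun (st : Int × List (Int × Int × Int)) (_ : Int) =>
          match pvHeapPop st.2 with
          | none => st
          | some (x, rest) => (st.1 + |x.1|, rest)) (acc + |mn.1|, (x :: xs).erase mn) l).1 = _
      rw [ih _ _ hlen' hneg']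
      -- name the value list and the popped maximum
      have hvV : -mn.1 ∈ (x :: xs).map (fun x => -x.1) := List.mem_map_of_mem hmem
      have hmaxV : ∀ y ∈ (x :: xs).map (fun x => -x.1), y ≤ -mn.1 := by
        intro y hy
        rcases List.mem_map.mp hy with ⟨z, hz, rfl⟩
        have := hle z hz; omega
      rw [pv_sorted_max_append _ _ hvV hmaxV]
      have hperm : (((x :: xs).map (fun x => -x.1)).erase (-mn.1)).Perm
          (((x :: xs).erase mn).map (fun x => -x.1)) := by
        have h1 : ((x :: xs).map (fun x => -x.1)).Perm
            (-mn.1 :: ((x :: xs).erase mn).map (fun x => -x.1)) := by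
          simpa using (List.perm_cons_erase hmem).map (fun x => -x.1)
        have h2 : ((x :: xs).map (fun x => -x.1)).Perm
            (-mn.1 :: ((x :: xs).map (fun x => -x.1)).erase (-mn.1)) :=
          List.perm_cons_erase hvV
        exact (h2.symm.trans h1).cons_inv
      rw [(PySem.List.sorted_id_eq_sorted_id_iff_perm _ _).mpr hperm]
      have hk : (x :: xs).length - (e :: l).length = xs.length - l.length := by simp
      have hklen : xs.length - l.length
          ≤ (PySem.List.sorted (((x :: xs).erase mn).map (fun x => -x.1)) (fun x => x) false).length := by
        rw [PySem.List.length_sorted, List.length_map, herlen]; omega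
      rw [hk, List.drop_append_of_le_length hklen, List.sum_append, herlen]
      have habs : |mn.1| = -mn.1 := abs_of_nonpos (hneg mn hmem)
      simp [habs]; ring

-- count of a pair in the residue-pair list is the product of the residue counts
theorem pv_count_map_pair (cks : List Int) (a r c : Int) :
    ((cks.map (fun cc => (a, cc))).count (r, c)) = if a = r then cks.count c else 0 := by
  induction cks with
  | nil => simp
  | cons x t ih =>
    simp only [List.map_cons, List.count_cons, ih]
    by_cases h : a = r <;> by_cases h2 : x = c <;> simp [h, h2]

theorem pv_count_flatMap (l : List Int) (g : Int → Int) (cks : List Int) (r c : Int) :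
    ((l.flatMap (fun i => cks.map (fun cc => (g i, cc)))).count (r, c))
      = (l.map g).count r * cks.count c := by
  induction l with
  | nil => simp
  | cons a l ih =>
    simp only [List.flatMap_cons, List.count_append, ih, List.map_cons, List.count_cons,
      pv_count_map_pair]
    by_cases h : g a = r
    · simp [h]; ring
    · simp [h]

-- the nested increment loop of A builds the counter of the flattened key list
theorem pv_nested_modify (L M : List Int) (key : Int → Int → Int × Int) (v : Int × Int) :
    ((L.foldl (fun d i => M.foldl (fun d j => d.modify (key i j) 0 (· + 1)) d)
        (PySem.Dict.empty : PySem.Dict (Int × Int) Int)).getD v 0)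
      = ((L.flatMap (fun i => M.map (key i))).count v : Int) := by
  have hinner : ∀ (d : PySem.Dict (Int × Int) Int) (i : Int),
      M.foldl (fun d j => d.modify (key i j) 0 (· + 1)) d
        = (M.map (key i)).foldl (fun d x => d.modify x 0 (· + 1)) d := by
    intro d i; rw [List.foldl_map]
  calc (L.foldl (fun d i => M.foldl (fun d j => d.modify (key i j) 0 (· + 1)) d)
        (PySem.Dict.empty : PySem.Dict (Int × Int) Int)).getD v 0
      = (L.foldl (fun d i => (M.map (key i)).foldl (fun d x => d.modify x 0 (· + 1)) d)
        (PySem.Dict.empty : PySem.Dict (Int × Int) Int)).getD v 0 := by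
        simp only [hinner]
    _ = (((L.map (fun i => M.map (key i))).flatten).foldl (fun d x => d.modify x 0 (· + 1))
        (PySem.Dict.empty : PySem.Dict (Int × Int) Int)).getD v 0 := by
        rw [List.foldl_flatten, List.foldl_map]
    _ = _ := by
        rw [PySem.Dict.getD_foldl_modify_add_one, ← List.flatMap_def]; simp

-- A's heap-build loop produces the flattened list of pushed triples
theorem pv_heap_shape (L M : List Int) (e : Int → Int → (Int × Int × Int)) (acc : List (Int × Int × Int)) :
    L.foldl (fun acc i => M.foldl (fun acc j => acc ++ [e i j]) acc) acc
      = acc ++ L.flatMap (fun i => M.map (e i)) := by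
  induction L generalizing acc with
  | nil => simp
  | cons a L ih =>
    rw [List.foldl_cons, PySem.List.foldl_append_singleton_eq_map, ih, List.flatMap_cons,
      List.append_assoc]

-- successor step of floor division and remainder (positive divisor)
theorem pv_div_mod_succ (n s : Int) (hs : 0 < s) :
    (if n % s = s - 1 then ((n + 1) % s = 0 ∧ (n + 1) / s = n / s + 1)
     else ((n + 1) % s = n % s + 1 ∧ (n + 1) / s = n / s)) := by
  have hd := Int.emod_add_mul_ediv n s
  have h0 := Int.emod_nonneg n (by omega : s ≠ 0)
  have h1 := Int.emod_lt_of_pos n hs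
  split_ifs with he
  · have hn1 : n + 1 = s * (n / s + 1) := by rw [mul_add, mul_one]; omega
    refine ⟨?_, ?_⟩
    · rw [hn1, Int.mul_emod_right]
    · rw [hn1, Int.mul_ediv_cancel_left _ (by omega : s ≠ 0)]
  · have h2 : n % s + 1 < s := by omega
    have hn1 : n + 1 = (n % s + 1) + (n / s) * s := by
      have : s * (n / s) = (n / s) * s := mul_comm _ _
      omega
    refine ⟨?_, ?_⟩
    · rw [hn1, show (n / s) * s = s * (n / s) from mul_comm _ _, Int.add_mul_emod_self_left,
        Int.emod_eq_of_lt (by omega) h2]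
    · rw [hn1, Int.add_mul_ediv_right _ _ (by omega : s ≠ 0),
        Int.ediv_eq_zero_of_lt (by omega) h2, zero_add]

-- residue count over range(n): n // s full rounds plus one extra for residues below n % s
theorem pv_count_aux (s r : Int) (hs : 1 ≤ s) (hr0 : 0 ≤ r) (hrs : r < s) : ∀ n : Nat,
    (((PySem.List.pyRange 0 (n : Int) 1).map (fun i => PySem.Int.mod i s)).count r : Int)
      = if r < (n : Int) % s then (n : Int) / s + 1 else (n : Int) / s := by
  intro n
  induction n with
  | zero =>
    rw [PySem.List.pyRange_one_eq_nil (by omega)]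
    simp
    omega
  | succ k ih =>
    have hk : ((k + 1 : Nat) : Int) = (k : Int) + 1 := by push_cast; ring
    rw [hk, PySem.List.pyRange_one_succ_right (by positivity), List.map_append,
      List.count_append]
    simp only [List.map_cons, List.map_nil]
    have hstep := pv_div_mod_succ (k : Int) s (by omega)
    have h0 := Int.emod_nonneg (k : Int) (by omega : s ≠ 0)
    have h1 := Int.emod_lt_of_pos (k : Int) (by omega : (0:Int) < s)
    have hone : (([PySem.Int.mod (k : Int) s].count r : Nat) : Int)
        = if (k : Int) % s = r then 1 else 0 := by
      rw [PySem.Int.mod_eq_emod_of_pos (by omega)]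
      by_cases h : (k : Int) % s = r <;> simp [h]
    push_cast
    rw [ih]
    rw [show ((List.count r [PySem.Int.mod (↑k) s] : Nat) : Int)
        = if (k : Int) % s = r then 1 else 0 from hone]
    split_ifs at hstep with he
    · obtain ⟨hm, hd⟩ := hstep
      rw [hm, hd]
      split_ifs <;> omega
    · obtain ⟨hm, hd⟩ := hstep
      rw [hm, hd]
      split_ifs <;> omega

-- the same, for an arbitrary integer bound (empty range when negative)
theorem pv_count_formula (h s r : Int) (hs : 1 ≤ s) (hr0 : 0 ≤ r) (hrs : r < s) :
    (((PySem.List.pyRange 0 h 1).map (fun i => PySem.Int.mod i s)).count r : Int)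
      = if r < PySem.Int.mod (max h 0) s then PySem.Int.floordiv (max h 0) s + 1
        else PySem.Int.floordiv (max h 0) s := by
  rw [PySem.Int.mod_eq_emod_of_pos (by omega), PySem.Int.floordiv_eq_ediv_of_pos (by omega)]
  by_cases hh : h ≤ 0
  · rw [PySem.List.pyRange_one_eq_nil hh, max_eq_right hh]
    simp
    omega
  · rw [max_eq_left (by omega)]
    have : h = ((h.toNat : Nat) : Int) := by omega
    rw [this]
    exact pv_count_aux s r hs hr0 hrs h.toNat

-- one pattern row: wr cells covered wq+1 times, the rest wq times
theorem pv_inner_block (s wq wr R : Int) (hwr0 : 0 ≤ wr) (hwrs : wr ≤ s) :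
    (PySem.List.pyRange 0 s 1).map (fun j => R * (if j < wr then wq + 1 else wq))
      = List.replicate wr.toNat (R * (wq + 1)) ++ List.replicate (s - wr).toNat (R * wq) := by
  have h1 : ∀ j ∈ PySem.List.pyRange 0 wr 1,
      R * (if j < wr then wq + 1 else wq) = R * (wq + 1) := by
    intro j hj; rw [PySem.List.mem_pyRange_one] at hj; rw [if_pos hj.2]
  have h2 : ∀ j ∈ PySem.List.pyRange wr s 1,
      R * (if j < wr then wq + 1 else wq) = R * wq := by
    intro j hj; rw [PySem.List.mem_pyRange_one] at hj; rw [if_neg (by omega)]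
  rw [PySem.List.pyRange_one_append 0 wr s hwr0 hwrs, List.map_append,
    List.map_congr_left h1, List.map_congr_left h2, List.map_const', List.map_const',
    PySem.List.length_pyRange_one, PySem.List.length_pyRange_one, Int.sub_zero]

-- flattening n copies of two replicate blocks
theorem pv_flatten_replicate_perm (n k1 k2 : Nat) (a b : Int) :
    ((List.replicate n (List.replicate k1 a ++ List.replicate k2 b)).flatten).Perm
      (List.replicate (n * k1) a ++ List.replicate (n * k2) b) := by
  induction n with
  | zero => simp
  | succ n ih =>
    simp only [List.replicate_succ, List.flatten_cons, Nat.succ_mul]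
    have hsw : ∀ A B C D : List Int, ((A ++ B) ++ (C ++ D)).Perm ((A ++ C) ++ (B ++ D)) := by
      intro A B C D
      simp only [List.append_assoc]
      exact (List.perm_append_left_iff A).mpr (List.perm_append_comm_assoc B C D)
    have h1 := (ih.append_left (List.replicate k1 a ++ List.replicate k2 b)).trans
      (hsw (List.replicate k1 a) (List.replicate k2 b)
        (List.replicate (n * k1) a) (List.replicate (n * k2) b))
    rw [← List.replicate_add, ← List.replicate_add] at h1
    rw [Nat.add_comm (n * k1) k1, Nat.add_comm (n * k2) k2]
    exact h1

-- the s x s pattern's multiset of cover counts, bucketed into the four products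
theorem pv_canonical_perm (s hq hr wq wr : Int) (hhr0 : 0 ≤ hr) (hhrs : hr ≤ s)
    (hwr0 : 0 ≤ wr) (hwrs : wr ≤ s) :
    ((PySem.List.pyRange 0 s 1).flatMap (fun i => (PySem.List.pyRange 0 s 1).map (fun j =>
        (if i < hr then hq + 1 else hq) * (if j < wr then wq + 1 else wq)))).Perm
      ([((hq + 1) * (wq + 1), hr * wr), ((hq + 1) * wq, hr * (s - wr)),
        (hq * (wq + 1), (s - hr) * wr), (hq * wq, (s - hr) * (s - wr))].flatMap
        (fun p => List.replicate p.2.toNat p.1)) := by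
  have hmap : ∀ i : Int, (PySem.List.pyRange 0 s 1).map (fun j =>
      (if i < hr then hq + 1 else hq) * (if j < wr then wq + 1 else wq))
      = List.replicate wr.toNat ((if i < hr then hq + 1 else hq) * (wq + 1))
        ++ List.replicate (s - wr).toNat ((if i < hr then hq + 1 else hq) * wq) :=
    fun i => pv_inner_block s wq wr _ hwr0 hwrs
  simp only [hmap]
  rw [PySem.List.pyRange_one_append 0 hr s hhr0 hhrs, List.flatMap_append,
    List.flatMap_def, List.flatMap_def]
  have hc1 : ∀ i ∈ PySem.List.pyRange 0 hr 1,
      List.replicate wr.toNat ((if i < hr then hq + 1 else hq) * (wq + 1))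
        ++ List.replicate (s - wr).toNat ((if i < hr then hq + 1 else hq) * wq)
      = List.replicate wr.toNat ((hq + 1) * (wq + 1))
        ++ List.replicate (s - wr).toNat ((hq + 1) * wq) := by
    intro i hi; rw [PySem.List.mem_pyRange_one] at hi; rw [if_pos hi.2]
  have hc2 : ∀ i ∈ PySem.List.pyRange hr s 1,
      List.replicate wr.toNat ((if i < hr then hq + 1 else hq) * (wq + 1))
        ++ List.replicate (s - wr).toNat ((if i < hr then hq + 1 else hq) * wq)
      = List.replicate wr.toNat (hq * (wq + 1))
        ++ List.replicate (s - wr).toNat (hq * wq) := by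
    intro i hi; rw [PySem.List.mem_pyRange_one] at hi; rw [if_neg (by omega)]
  rw [List.map_congr_left hc1, List.map_congr_left hc2, List.map_const', List.map_const',
    PySem.List.length_pyRange_one, PySem.List.length_pyRange_one, Int.sub_zero]
  have hcast : ∀ x y : Int, 0 ≤ x → 0 ≤ y → (x * y).toNat = x.toNat * y.toNat :=
    fun x y hx hy => Int.toNat_mul hx hy
  simp only [List.flatMap_cons, List.flatMap_nil, List.append_nil]
  refine ((pv_flatten_replicate_perm _ _ _ _ _).append (pv_flatten_replicate_perm _ _ _ _ _)).trans ?_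
  rw [hcast hr wr hhr0 hwr0, hcast hr (s - wr) hhr0 (by omega),
    hcast (s - hr) wr (by omega) hwr0, hcast (s - hr) (s - wr) (by omega) (by omega)]
  simp only [List.append_assoc]
  exact List.Perm.refl _

-- the expansion of value-sorted buckets is non-increasing
theorem pv_expansion_pairwise (bs : List (Int × Int))
    (h : List.Pairwise (fun a b => b.1 ≤ a.1) bs) :
    List.Pairwise (fun x y => y ≤ x) (bs.flatMap (fun p => List.replicate p.2.toNat p.1)) := by
  induction bs with
  | nil => simp
  | cons p bs ih =>
    rw [List.flatMap_cons, List.pairwise_append]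
    rcases List.pairwise_cons.mp h with ⟨hhead, htail⟩
    refine ⟨List.pairwise_replicate_of_refl, ih htail, ?_⟩
    intro x hx y hy
    rw [List.eq_of_mem_replicate hx]
    rcases List.mem_flatMap.mp hy with ⟨q, hq, hyq⟩
    rw [List.eq_of_mem_replicate hyq]
    exact hhead q hq

-- the greedy loop takes the first `rem` elements of the bucket expansion
theorem pv_greedy (bs : List (Int × Int)) (acc rem : Int) (hrem : 0 ≤ rem)
    (hcnt : ∀ p ∈ bs, 0 ≤ p.2) :
    (bs.foldl (fun (st : Int × Int) p =>
        (st.1 + min p.2 st.2 * p.1, st.2 - min p.2 st.2)) (acc, rem)).1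
      = acc + ((bs.flatMap (fun p => List.replicate p.2.toNat p.1)).take rem.toNat).sum := by
  induction bs generalizing acc rem with
  | nil => simp
  | cons p bs ih =>
    rw [List.foldl_cons, List.flatMap_cons]
    have hp := hcnt p (List.mem_cons_self ..)
    rw [ih (acc + min p.2 rem * p.1) (rem - min p.2 rem) (by omega)
      (fun q hq => hcnt q (List.mem_cons_of_mem _ hq))]
    rw [List.take_append, List.take_replicate, List.sum_append, List.sum_replicate,
      List.length_replicate]
    have h1 : (rem - min p.2 rem).toNat = rem.toNat - p.2.toNat := by omega
    have h2 : ((min rem.toNat p.2.toNat : Nat) : Int) = min p.2 rem := by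
      push_cast; omega
    rw [h1, nsmul_eq_mul, h2]
    ring

-- the main case: 0 < maxOnes ≤ sideLength², 1 ≤ sideLength
theorem pv_main (width height s m : Int) (hm : 0 < m) (hs : 1 ≤ s) (hms : m ≤ s * s) :
    ((PySem.List.pyRange 0 m 1).foldl
      (fun (st : Int × List (Int × Int × Int)) _ =>
        match pvHeapPop st.2 with
        | none => st
        | some (x, rest) => (st.1 + |x.1|, rest))
      (0, (PySem.List.pyRange 0 s 1).foldl (fun acc i =>
        (PySem.List.pyRange 0 s 1).foldl (fun acc j =>
          acc ++ [(-(((PySem.List.pyRange 0 height 1).foldl (fun d i =>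
              (PySem.List.pyRange 0 width 1).foldl (fun d j =>
                d.modify (PySem.Int.mod i s, PySem.Int.mod j s) 0 (· + 1)) d)
              PySem.Dict.empty).getD (i, j) 0), i, j)]) acc) [])).1
    = ((PySem.List.sorted
        [((PySem.Int.floordiv (max height 0) s + 1) * (PySem.Int.floordiv (max width 0) s + 1),
          PySem.Int.mod (max height 0) s * PySem.Int.mod (max width 0) s),
         ((PySem.Int.floordiv (max height 0) s + 1) * PySem.Int.floordiv (max width 0) s,
          PySem.Int.mod (max height 0) s * (s - PySem.Int.mod (max width 0) s)),
         (PySem.Int.floordiv (max height 0) s * (PySem.Int.floordiv (max width 0) s + 1),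
          (s - PySem.Int.mod (max height 0) s) * PySem.Int.mod (max width 0) s),
         (PySem.Int.floordiv (max height 0) s * PySem.Int.floordiv (max width 0) s,
          (s - PySem.Int.mod (max height 0) s) * (s - PySem.Int.mod (max width 0) s))]
        (fun b => b.1) true).foldl
      (fun (st : Int × Int) p => (st.1 + min p.2 st.2 * p.1, st.2 - min p.2 st.2)) (0, m)).1 := by
  -- each cell's value is the product of the two residue counts
  have hcell : ∀ i j : Int,
      ((PySem.List.pyRange 0 height 1).foldl (fun d i =>
          (PySem.List.pyRange 0 width 1).foldl (fun d j =>
            d.modify (PySem.Int.mod i s, PySem.Int.mod j s) 0 (· + 1)) d)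
          PySem.Dict.empty).getD (i, j) 0
        = ((((PySem.List.pyRange 0 height 1).map (fun i => PySem.Int.mod i s)).count i
            * ((PySem.List.pyRange 0 width 1).map (fun j => PySem.Int.mod j s)).count j : Nat) : Int) := by
    intro i j
    rw [pv_nested_modify]
    congr 1
    have : ∀ a : Int, (PySem.List.pyRange 0 width 1).map
          (fun jj => (PySem.Int.mod a s, PySem.Int.mod jj s))
        = ((PySem.List.pyRange 0 width 1).map (fun jj => PySem.Int.mod jj s)).map
            (fun cc => (PySem.Int.mod a s, cc)) := by
      intro a; rw [List.map_map]; rfl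
    simp only [this]
    exact pv_count_flatMap _ _ _ _ _
  rw [pv_heap_shape, List.nil_append]
  have hHlen : ((PySem.List.pyRange 0 s 1).flatMap (fun i =>
      (PySem.List.pyRange 0 s 1).map (fun j =>
        (-(((PySem.List.pyRange 0 height 1).foldl (fun d i =>
            (PySem.List.pyRange 0 width 1).foldl (fun d j =>
              d.modify (PySem.Int.mod i s, PySem.Int.mod j s) 0 (· + 1)) d)
            PySem.Dict.empty).getD (i, j) 0), i, j)))).length = s.toNat * s.toNat := by
    simp [List.length_flatMap, PySem.List.length_pyRange_one, List.map_const']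
  have hmle : m.toNat ≤ s.toNat * s.toNat := by
    refine Int.toNat_le.mpr ?_
    push_cast
    rw [Int.toNat_of_nonneg (by omega : (0:Int) ≤ s)]
    exact hms
  have hlen : (PySem.List.pyRange 0 m 1).length ≤ ((PySem.List.pyRange 0 s 1).flatMap (fun i =>
      (PySem.List.pyRange 0 s 1).map (fun j =>
        (-(((PySem.List.pyRange 0 height 1).foldl (fun d i =>
            (PySem.List.pyRange 0 width 1).foldl (fun d j =>
              d.modify (PySem.Int.mod i s, PySem.Int.mod j s) 0 (· + 1)) d)
            PySem.Dict.empty).getD (i, j) 0), i, j)))).length := by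
    rw [hHlen, PySem.List.length_pyRange_one]
    simpa using hmle
  have hneg : ∀ x ∈ (PySem.List.pyRange 0 s 1).flatMap (fun i =>
      (PySem.List.pyRange 0 s 1).map (fun j =>
        (-(((PySem.List.pyRange 0 height 1).foldl (fun d i =>
            (PySem.List.pyRange 0 width 1).foldl (fun d j =>
              d.modify (PySem.Int.mod i s, PySem.Int.mod j s) 0 (· + 1)) d)
            PySem.Dict.empty).getD (i, j) 0), i, j))), x.1 ≤ 0 := by
    intro x hx
    rw [List.mem_flatMap] at hx
    obtain ⟨i, hi, hx⟩ := hx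
    rw [List.mem_map] at hx
    obtain ⟨j, hj, rfl⟩ := hx
    simp only [hcell]
    omega
  rw [pv_popLoop _ _ _ hlen hneg, hHlen, PySem.List.length_pyRange_one, zero_add]
  -- the popped value list is the list of cell cover counts
  have hmapheap : ((PySem.List.pyRange 0 s 1).flatMap (fun i =>
      (PySem.List.pyRange 0 s 1).map (fun j =>
        (-(((PySem.List.pyRange 0 height 1).foldl (fun d i =>
            (PySem.List.pyRange 0 width 1).foldl (fun d j =>
              d.modify (PySem.Int.mod i s, PySem.Int.mod j s) 0 (· + 1)) d)
            PySem.Dict.empty).getD (i, j) 0), i, j)))).map (fun x => -x.1)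
      = (PySem.List.pyRange 0 s 1).flatMap (fun i =>
          (PySem.List.pyRange 0 s 1).map (fun j =>
            ((((PySem.List.pyRange 0 height 1).map (fun i => PySem.Int.mod i s)).count i : Int)
              * (((PySem.List.pyRange 0 width 1).map (fun j => PySem.Int.mod j s)).count j : Int)))) := by
    simp only [List.map_flatMap, List.map_map, Function.comp_def, neg_neg, hcell]
    push_cast
    rfl
  rw [hmapheap]
  -- abbreviations for the four division parameters
  set hq := PySem.Int.floordiv (max height 0) s with hqdef
  set hr := PySem.Int.mod (max height 0) s with hrdef
  set wq := PySem.Int.floordiv (max width 0) s with wqdef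
  set wr := PySem.Int.mod (max width 0) s with wrdef
  have hhr0 : 0 ≤ hr := PySem.Int.mod_nonneg _ (by omega)
  have hhrs : hr < s := PySem.Int.mod_lt _ (by omega)
  have hwr0 : 0 ≤ wr := PySem.Int.mod_nonneg _ (by omega)
  have hwrs : wr < s := PySem.Int.mod_lt _ (by omega)
  -- rewrite each cell by the residue-count formula
  have hV : (PySem.List.pyRange 0 s 1).flatMap (fun i =>
        (PySem.List.pyRange 0 s 1).map (fun j =>
          ((((PySem.List.pyRange 0 height 1).map (fun i => PySem.Int.mod i s)).count i : Int)
            * (((PySem.List.pyRange 0 width 1).map (fun j => PySem.Int.mod j s)).count j : Int))))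
      = (PySem.List.pyRange 0 s 1).flatMap (fun i =>
          (PySem.List.pyRange 0 s 1).map (fun j =>
            (if i < hr then hq + 1 else hq) * (if j < wr then wq + 1 else wq))) := by
    rw [List.flatMap_def, List.flatMap_def]
    congr 1
    apply List.map_congr_left
    intro i hi
    rw [PySem.List.mem_pyRange_one] at hi
    apply List.map_congr_left
    intro j hj
    rw [PySem.List.mem_pyRange_one] at hj
    rw [pv_count_formula height s i hs hi.1 hi.2, pv_count_formula width s j hs hj.1 hj.2]
  rw [hV]
  -- buckets and their expansion
  set buckets : List (Int × Int) :=
    [((hq + 1) * (wq + 1), hr * wr), ((hq + 1) * wq, hr * (s - wr)),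
     (hq * (wq + 1), (s - hr) * wr), (hq * wq, (s - hr) * (s - wr))] with hbdef
  set sbuckets := PySem.List.sorted buckets (fun b => b.1) true with hsbdef
  set E := sbuckets.flatMap (fun p => List.replicate p.2.toNat p.1) with hEdef
  have hEperm : E.Perm (buckets.flatMap (fun p => List.replicate p.2.toNat p.1)) :=
    List.Perm.flatMap_right _ (PySem.List.sorted_perm buckets (fun b => b.1) true)
  have hVE : ((PySem.List.pyRange 0 s 1).flatMap (fun i =>
      (PySem.List.pyRange 0 s 1).map (fun j =>
        (if i < hr then hq + 1 else hq) * (if j < wr then wq + 1 else wq)))).Perm E :=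
    (pv_canonical_perm s hq hr wq wr hhr0 (le_of_lt hhrs) hwr0 (le_of_lt hwrs)).trans hEperm.symm
  have hpair : List.Pairwise (fun x y => y ≤ x) E :=
    pv_expansion_pairwise sbuckets (PySem.List.sorted_pairwise_rev buckets (fun b => b.1))
  have hsorted : PySem.List.sorted ((PySem.List.pyRange 0 s 1).flatMap (fun i =>
      (PySem.List.pyRange 0 s 1).map (fun j =>
        (if i < hr then hq + 1 else hq) * (if j < wr then wq + 1 else wq))))
      (fun x => x) false = E.reverse := by
    apply PySem.List.sorted_id_eq_of_perm_of_pairwise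
    · exact (List.reverse_perm E).trans hVE.symm
    · exact List.pairwise_reverse.mpr hpair
  have hElen : E.length = s.toNat * s.toNat := by
    rw [← hVE.length_eq]
    simp [List.length_flatMap, PySem.List.length_pyRange_one, List.map_const']
  rw [hsorted, List.drop_reverse, List.sum_reverse, hElen,
    show s.toNat * s.toNat - (s.toNat * s.toNat - (m - 0).toNat) = m.toNat by omega]
  -- the greedy loop over the sorted buckets takes exactly these elements
  have hcnt : ∀ p ∈ sbuckets, 0 ≤ p.2 := by
    intro p hp
    rw [PySem.List.mem_sorted, hbdef] at hp
    simp only [List.mem_cons, List.not_mem_nil, or_false] at hp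
    rcases hp with h | h | h | h <;> rw [h]
    · exact mul_nonneg hhr0 hwr0
    · exact mul_nonneg hhr0 (by omega)
    · exact mul_nonneg (by omega) hwr0
    · exact mul_nonneg (by omega) (by omega)
  rw [pv_greedy sbuckets 0 m (le_of_lt hm) hcnt, zero_add, ← hEdef]

-- ===== VERDICT (by name: the statement is the Claim_ definition above) =====
theorem maximumNumberOfOnes_spec : Claim_equal_maximumNumberOfOnes := by
  intro w h s m _ hpre
  unfold Spec_maximumNumberOfOnes
  by_cases hm0 : m = 0
  · subst hm0; simp [maximumNumberOfOnes, maximumNumberOfOnes_alt]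
  · by_cases hmneg : m < 0
    · have hnil : PySem.List.pyRange 0 m 1 = [] := PySem.List.pyRange_one_eq_nil (by omega)
      simp [maximumNumberOfOnes, maximumNumberOfOnes_alt, hm0, le_of_lt hmneg, hnil]
    · have hm : 0 < m := by omega
      obtain hpre | hpre | hpre := hpre
      · omega
      · omega
      · obtain ⟨-, hs, hms⟩ := hpre
        simp only [maximumNumberOfOnes, maximumNumberOfOnes_alt, if_neg hm0,
          if_neg (by omega : ¬ m ≤ 0)]
        exact pv_main w h s m hm hs hms
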